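-- pv_equiv track=rewrite | github.com/Vinay-Rai/code-and-debug-DSA-with-python | cop.py | solve_tree_beauty
-- ===== SOURCE A (Python) =====
-- MOD = 10**9 + 7
--
-- def solve_tree_beauty(n, A, B, parent, queries):
--     from collections import defaultdict
--
--     tree = [[] for _ in range(n + 1)]
--     for i in range(1, n + 1):
--         if parent[i] != 0:
--             tree[parent[i]].append(i)
--
--     in_time = [[0] * (n + 1) for _ in range(2)]
--     out_time = [[0] * (n + 1) for _ in range(2)]
--     time = [1, 1]
--
--     def dfs(node, root_index, timer):
--         in_time[root_index][node] = timer[0]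
--         timer[0] += 1
--         for child in tree[node]:
--             dfs(child, root_index, timer)
--         out_time[root_index][node] = timer[0] - 1
--
--     dfs(A, 0, [1])
--     dfs(B, 1, [1])
--
--     def is_ancestor(u, v, root_index):
--         return in_time[root_index][u] <= in_time[root_index][v] <= out_time[root_index][u]
--
--     answer_sum = 0
--     k = 0
--     for u, v in queries:
--         u = (u + k) % n + 1
--         v = (v + k) % n + 1
--         if is_ancestor(u, v, 0) and is_ancestor(u, v, 1):
--             beauty = 1
--         else:
--             beauty = 0
--         k = beauty
--         answer_sum = (answer_sum + beauty) % MOD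
--
--     return answer_sum
-- ===== SOURCE B (Python) =====
-- MOD = 10**9 + 7
--
-- def solve_tree_beauty(n, A, B, parent, queries):
--     tree = [[] for _ in range(n + 1)]
--     for i in range(1, n + 1):
--         if parent[i] != 0:
--             tree[parent[i]].append(i)
--
--     def dfs_times(root):
--         in_t = [0] * (n + 1)
--         out_t = [0] * (n + 1)
--         timer = 1
--         stack = [(root, False)]
--         while stack:
--             node, done = stack.pop()
--             if done:
--                 out_t[node] = timer - 1
--             else:
--                 in_t[node] = timer
--                 timer += 1
--                 stack.append((node, True))
--                 for child in reversed(tree[node]):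
--                     stack.append((child, False))
--         return in_t, out_t
--
--     times = [dfs_times(A), dfs_times(B)]
--
--     answer_sum = 0
--     k = 0
--     for u, v in queries:
--         u = (u + k) % n + 1
--         v = (v + k) % n + 1
--         beauty = 1
--         for in_t, out_t in times:
--             if not (in_t[u] <= in_t[v] <= out_t[u]):
--                 beauty = 0
--         k = beauty
--         answer_sum = (answer_sum + beauty) % MOD
--     return answer_sum
-- ===== Notes on version B (the rewrite author's own statement) =====
-- stated objective: alternative
-- what changed: The recursive timestamp DFS (nested Python function with a shared timer list) is replaced by an explicit-stack iterative DFS done once per rooting, pushing (node, done) frames and assigning in_time on first visit and out_time on the post-order pop; the per-query check folds over the two rootings' time tables instead of calling a closure.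
import Mathlib
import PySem

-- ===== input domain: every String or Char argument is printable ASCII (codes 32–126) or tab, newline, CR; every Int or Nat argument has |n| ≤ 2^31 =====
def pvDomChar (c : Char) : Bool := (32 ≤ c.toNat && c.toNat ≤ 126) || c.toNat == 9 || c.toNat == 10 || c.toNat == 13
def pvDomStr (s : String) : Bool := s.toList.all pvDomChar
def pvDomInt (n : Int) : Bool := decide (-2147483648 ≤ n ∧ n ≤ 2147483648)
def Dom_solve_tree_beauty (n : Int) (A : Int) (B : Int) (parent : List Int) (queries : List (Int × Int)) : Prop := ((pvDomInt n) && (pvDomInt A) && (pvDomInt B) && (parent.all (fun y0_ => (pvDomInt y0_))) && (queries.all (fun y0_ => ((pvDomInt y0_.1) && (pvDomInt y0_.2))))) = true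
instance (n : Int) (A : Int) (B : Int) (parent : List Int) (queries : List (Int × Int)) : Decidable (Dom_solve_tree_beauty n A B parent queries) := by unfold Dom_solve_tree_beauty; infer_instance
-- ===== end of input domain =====

-- B replaces A's recursive DFS with an explicit-stack iterative DFS (same timestamps, no Python
-- recursion); tree building and the query loop keep their meaning, the answer is identical.

-- Shared helper: Python's negative list index wraps by the list length (here n+1).
def pvWrap (n : Int) (x : Int) : Int := if x < 0 then x + (n + 1) else x

-- Shared helper: both Pythons build the children lists with the very same loop
-- 'for i in 1..n: if parent[i] != 0: tree[parent[i]].append(i)'.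
-- Python's negative index wraps (tree[p] = tree[p+n+1]); an out-of-range p is an
-- IndexError, excluded by Pre_ — the range test below is only a totality guard.
def pvBuildTree (n : Int) (parent : List Int) : List (List Nat) :=
  (List.range n.toNat).foldl (fun tree i0 =>
    let i := i0 + 1
    let p := parent.getD i 0
    if p = 0 then tree
    else
      let w : Int := if p < 0 then p + (n + 1) else p
      if 0 ≤ w ∧ w ≤ n then tree.modify w.toNat (fun l => l ++ [i]) else tree)
    (List.replicate (n + 1).toNat [])

-- ===== PORT A =====
-- A's recursive dfs: state = (in_time row, out_time row, timer); fuel is a totality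
-- guard only (under Pre_ the depth is ≤ n, so fuel n+1 never runs out).
def pvDfsA (tree : List (List Nat)) : Nat → Nat → List Int × List Int × Int → List Int × List Int × Int
  | 0, _, st => st
  | fuel+1, node, st =>
    let st1 : List Int × List Int × Int := (st.1.set node st.2.2, st.2.1, st.2.2 + 1)
    let st2 := (tree.getD node []).foldl (fun s c => pvDfsA tree fuel c s) st1
    (st2.1, st2.2.1.set node (st2.2.2 - 1), st2.2.2)

def solve_tree_beauty (n : Int) (A : Int) (B : Int) (parent : List Int) (queries : List (Int × Int)) : Int :=
  let tree := pvBuildTree n parent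
  let z : List Int := List.replicate (n + 1).toNat 0
  let s0 := pvDfsA tree (n.toNat + 1) (pvWrap n A).toNat (z, z, 1)
  let s1 := pvDfsA tree (n.toNat + 1) (pvWrap n B).toNat (z, z, 1)
  (queries.foldl (fun (acc : Int × Int) q =>
    let u := PySem.Int.mod (q.1 + acc.2) n + 1
    let v := PySem.Int.mod (q.2 + acc.2) n + 1
    let beauty : Int :=
      if (s0.1.getD u.toNat 0 ≤ s0.1.getD v.toNat 0 ∧ s0.1.getD v.toNat 0 ≤ s0.2.1.getD u.toNat 0) ∧
         (s1.1.getD u.toNat 0 ≤ s1.1.getD v.toNat 0 ∧ s1.1.getD v.toNat 0 ≤ s1.2.1.getD u.toNat 0) then 1 else 0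
    (PySem.Int.mod (acc.1 + beauty) 1000000007, beauty)) ((0 : Int), (0 : Int))).1

-- ===== PORT B =====
-- B's iterative dfs: a stack of (node, done) pairs; the Nat in each frame is a per-frame
-- fuel (depth budget) added only so the Lean definition is total — Python B needs none.
def pvStackW (S : Nat) : List (Nat × Bool × Nat) → Nat
  | [] => 0
  | (_, true, _) :: r => pvStackW S r
  | (_, false, f) :: r => (S + 1) ^ f + pvStackW S r

theorem pvStackW_append (S : Nat) (a b : List (Nat × Bool × Nat)) :
    pvStackW S (a ++ b) = pvStackW S a + pvStackW S b := by
  induction a with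
  | nil => simp [pvStackW]
  | cons x r ih => rcases x with ⟨m, d, f⟩; cases d <;> simp [pvStackW, ih]; omega


theorem pvStackW_map (S f : Nat) (cs : List Nat) :
    pvStackW S (cs.map (fun c => (c, false, f))) = cs.length * (S + 1) ^ f := by
  induction cs with
  | nil => simp [pvStackW]
  | cons c r ih => simp [pvStackW, ih]; ring

theorem pvGetD_len_le (tree : List (List Nat)) (node : Nat) :
    (tree.getD node []).length ≤ (tree.map List.length).sum := by
  by_cases h : node < tree.length
  · have hm : tree[node] ∈ tree := List.getElem_mem h
    calc (tree.getD node []).length = tree[node].length := by rw [List.getD_eq_getElem _ _ h]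
    _ ≤ (tree.map List.length).sum :=
        List.le_sum_of_mem (List.mem_map_of_mem hm)
  · simp [List.getD_eq_getElem?_getD, List.getElem?_eq_none (by omega : tree.length ≤ node)]

def pvDfsB (tree : List (List Nat)) : List (Nat × Bool × Nat) → List Int × List Int × Int → List Int × List Int × Int
  | [], st => st
  | (node, true, _) :: rest, st =>
      pvDfsB tree rest (st.1, st.2.1.set node (st.2.2 - 1), st.2.2)
  | (_, false, 0) :: rest, st => pvDfsB tree rest st
  | (node, false, f+1) :: rest, st =>
      let st1 : List Int × List Int × Int := (st.1.set node st.2.2, st.2.1, st.2.2 + 1)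
      pvDfsB tree ((tree.getD node []).map (fun c => (c, false, f)) ++ (node, true, 0) :: rest) st1
  termination_by stack _ => (pvStackW ((tree.map List.length).sum) stack, stack.length)
  decreasing_by
  · apply Prod.Lex.right; simp
  · apply Prod.Lex.left; simp only [pvStackW, pow_zero]; omega
  · apply Prod.Lex.left
    simp only [pvStackW, pvStackW_append, pvStackW_map, Nat.succ_eq_add_one]
    have h1 := pvGetD_len_le tree node
    have h2 : (tree.getD node []).length * ((tree.map List.length).sum + 1) ^ f <
        ((tree.map List.length).sum + 1) ^ (f + 1) := by
      calc (tree.getD node []).length * ((tree.map List.length).sum + 1) ^ f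
          < ((tree.map List.length).sum + 1) * ((tree.map List.length).sum + 1) ^ f :=
            (Nat.mul_lt_mul_right (Nat.pow_pos (by omega))).mpr (by omega)
        _ = ((tree.map List.length).sum + 1) ^ (f + 1) := by ring
    omega

def pvDfsTimes (n : Int) (tree : List (List Nat)) (root : Nat) : List Int × List Int :=
  ((pvDfsB tree [(root, false, n.toNat + 1)]
      (List.replicate (n + 1).toNat 0, List.replicate (n + 1).toNat 0, 1)).1,
   (pvDfsB tree [(root, false, n.toNat + 1)]
      (List.replicate (n + 1).toNat 0, List.replicate (n + 1).toNat 0, 1)).2.1)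

def solve_tree_beauty_alt (n : Int) (A : Int) (B : Int) (parent : List Int) (queries : List (Int × Int)) : Int :=
  let tree := pvBuildTree n parent
  let times := [pvDfsTimes n tree (pvWrap n A).toNat, pvDfsTimes n tree (pvWrap n B).toNat]
  (queries.foldl (fun (acc : Int × Int) q =>
    let u := PySem.Int.mod (q.1 + acc.2) n + 1
    let v := PySem.Int.mod (q.2 + acc.2) n + 1
    let beauty : Int := times.foldl (fun b t =>
      if ¬ (t.1.getD u.toNat 0 ≤ t.1.getD v.toNat 0 ∧ t.1.getD v.toNat 0 ≤ t.2.getD u.toNat 0) then 0 else b) 1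
    (PySem.Int.mod (acc.1 + beauty) 1000000007, beauty)) ((0 : Int), (0 : Int))).1

-- ===== PRECONDITION & SPEC =====
-- The (wrapped) parent of j, as the tree-building loop reads it; 0 terminates a chain.
def pvParStep (n : Int) (parent : List Int) (j : Int) : Int :=
  if 1 ≤ j ∧ j ≤ n then pvWrap n (parent.getD j.toNat 0) else 0

-- Root r (after wraparound) does not lie on a parent-pointer cycle: on such an input
-- the Python dfs recurses forever (RecursionError).  Node 0 is never on a cycle.
def pvNoCycle (n : Int) (parent : List Int) (r : Int) : Prop :=
  pvWrap n r = 0 ∨ ∀ k : Nat, k < n.toNat → (pvParStep n parent)^[k + 1] (pvWrap n r) ≠ pvWrap n r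

-- Pre_ = the inputs on which the Python A returns: either the degenerate n = 0 (empty
-- tree: roots index the one empty children list, no query survives x % 0), or n ≥ 1 with
-- every parent[i] and both roots valid (possibly negative, wrapping) indices of tree and
-- neither root on a parent cycle (else A raises IndexError / ZeroDivisionError /
-- RecursionError).
def Pre_solve_tree_beauty (n : Int) (A : Int) (B : Int) (parent : List Int) (queries : List (Int × Int)) : Prop :=
  (n = 0 ∧ queries = [] ∧ -1 ≤ A ∧ A ≤ 0 ∧ -1 ≤ B ∧ B ≤ 0) ∨
  (1 ≤ n ∧ n + 1 ≤ (parent.length : Int) ∧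
   -(n + 1) ≤ A ∧ A ≤ n ∧ -(n + 1) ≤ B ∧ B ≤ n ∧
   (∀ i : Nat, i < n.toNat →
     (-(n + 1) ≤ parent.getD (i + 1) 0 ∧ parent.getD (i + 1) 0 ≤ n)) ∧
   pvNoCycle n parent A ∧ pvNoCycle n parent B)

instance (n : Int) (A : Int) (B : Int) (parent : List Int) (queries : List (Int × Int)) : Decidable (Pre_solve_tree_beauty n A B parent queries) := by
  unfold Pre_solve_tree_beauty pvNoCycle; infer_instance

def pvWitness_solve_tree_beauty : Int × Int × Int × List Int × (List (Int × Int)) :=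
  (4, 2, 2, [0, 0, 0, 2, 1], [(3, 3)])

def Spec_solve_tree_beauty (n : Int) (A : Int) (B : Int) (parent : List Int) (queries : List (Int × Int)) (out : Int) : Prop := out = solve_tree_beauty_alt n A B parent queries
instance (n : Int) (A : Int) (B : Int) (parent : List Int) (queries : List (Int × Int)) (out : Int) : Decidable (Spec_solve_tree_beauty n A B parent queries out) := by unfold Spec_solve_tree_beauty; infer_instance

-- ===== CLAIM (what is proved, stated in full; the proofs are below) =====
def Claim_equal_solve_tree_beauty : Prop := ∀ (n : Int) (A : Int) (B : Int) (parent : List Int) (queries : List (Int × Int)), Dom_solve_tree_beauty n A B parent queries → Pre_solve_tree_beauty n A B parent queries → Spec_solve_tree_beauty n A B parent queries (solve_tree_beauty n A B parent queries)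

-- ===== LEMMAS AND PROOFS =====

-- The stack machine simulates the recursion: processing one (node, enter, f) frame is
-- exactly one recursive call pvDfsA at fuel f.  Holds for EVERY fuel, no side condition.
theorem pvDfs_sim (tree : List (List Nat)) : ∀ (f : Nat) (node : Nat)
    (rest : List (Nat × Bool × Nat)) (st : List Int × List Int × Int),
    pvDfsB tree ((node, false, f) :: rest) st = pvDfsB tree rest (pvDfsA tree f node st) := by
  intro f
  induction f with
  | zero => intro node rest st; rw [pvDfsB, pvDfsA]
  | succ f ih =>
    have aux : ∀ (cs : List Nat) (rest : List (Nat × Bool × Nat)) (st : List Int × List Int × Int),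
        pvDfsB tree (cs.map (fun c => (c, false, f)) ++ rest) st =
          pvDfsB tree rest (cs.foldl (fun s c => pvDfsA tree f c s) st) := by
      intro cs
      induction cs with
      | nil => intro rest st; rfl
      | cons c cr ihc =>
        intro rest st
        simp only [List.map_cons, List.cons_append, List.foldl_cons]
        rw [ih, ihc]
    intro node rest st
    rw [pvDfsB, pvDfsA]
    rw [aux, pvDfsB]

theorem pvDfsTimes_eq (n : Int) (tree : List (List Nat)) (root : Nat) :
    pvDfsTimes n tree root =
      ((pvDfsA tree (n.toNat + 1) root
          (List.replicate (n + 1).toNat 0, List.replicate (n + 1).toNat 0, 1)).1,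
       (pvDfsA tree (n.toNat + 1) root
          (List.replicate (n + 1).toNat 0, List.replicate (n + 1).toNat 0, 1)).2.1) := by
  unfold pvDfsTimes
  rw [pvDfs_sim, pvDfsB]

-- B's two-element fold over the rootings equals A's single conjunction test.
theorem pvBeauty_eq (c0 c1 : Prop) [Decidable c0] [Decidable c1] :
    (if ¬ c1 then (0 : Int) else if ¬ c0 then 0 else 1) = if c0 ∧ c1 then 1 else 0 := by
  split_ifs <;> tauto

-- ===== VERDICT (by name: the statement is the Claim_ definition above) =====
theorem solve_tree_beauty_spec : Claim_equal_solve_tree_beauty := by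
  intro n A B parent queries _ _
  simp only [Spec_solve_tree_beauty, solve_tree_beauty, solve_tree_beauty_alt, pvDfsTimes_eq,
    List.foldl_cons, List.foldl_nil, pvBeauty_eq]
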